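-- pv_equiv track=rewrite | github.com/ahar0n/python-notebooks | 04 Estructuras de datos/answers/tratamiento_de_diccionarios.py | lista_de_palabras
-- ===== SOURCE A (Python) =====
-- def lista_de_palabras(texto):
--     palabras = []
--     while len(texto) > 0:
--         if ' ' in texto:
--             # obtiene palabra si texto contiene espacios
--             index_espacio = texto.index(' ')
--             palabra = texto[:index_espacio]
--             texto = texto[index_espacio + 1:]  # texto restante
--         else:
--             # obtiene palabra si texto no contiene espacios
--             palabra = texto
--             texto = ''  # texto restante
--
--         # eliminar puntuación de la palabra
--         palabra_limpia = ''
--         for letra in palabra: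
--             if letra in '.,¡!¿?':
--                 continue
--             palabra_limpia += letra
--
--         palabras.append(palabra_limpia)
--
--     return palabras
-- ===== SOURCE B (Python) =====
-- def lista_de_palabras(texto):
--     # One str.split on the space separator instead of repeated index/slice segmentation; the final token is
--     # dropped when it is empty (matching A's segmentation), then each token is cleaned.
--     tokens = texto.split(' ')
--     if tokens[-1] == '':
--         tokens.pop()
--     return [''.join(c for c in w if c not in '.,¡!¿?') for w in tokens]
-- ===== Notes on version B (the rewrite author's own statement) =====
-- stated objective: simpler
-- what changed: A repeatedly searches for the next space with .index and re-slices the remaining text in a while loop; B performs one str.split on the space separator, drops the final token when it is empty (matching A's segmentation exactly), and cleans each token with a filtering comprehension.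
import Mathlib
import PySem

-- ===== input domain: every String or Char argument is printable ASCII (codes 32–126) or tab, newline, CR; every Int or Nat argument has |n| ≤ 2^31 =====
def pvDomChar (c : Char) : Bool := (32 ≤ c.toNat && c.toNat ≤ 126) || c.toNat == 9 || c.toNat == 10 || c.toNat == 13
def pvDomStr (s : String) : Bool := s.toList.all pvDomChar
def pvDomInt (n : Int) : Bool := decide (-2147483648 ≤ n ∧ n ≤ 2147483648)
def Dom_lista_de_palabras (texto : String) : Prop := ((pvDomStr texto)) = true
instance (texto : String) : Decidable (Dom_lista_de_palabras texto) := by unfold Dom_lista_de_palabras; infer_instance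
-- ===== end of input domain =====

-- B replaces A's repeated index/slice re-segmentation of the text with one str.split on the space separator
-- followed by dropping the final token when empty and cleaning each token (objective: simpler).

-- ===== PORT A =====
-- the punctuation literal '.,¡!¿?' both sources contain
def pvPunct : List Char := ['.', ',', '¡', '!', '¿', '?']

def pvLoopA (texto : List Char) (palabras : List String) : List String :=
  if h1 : 0 < texto.length then
    if h2 : PySem.Chars.isIn [' '] texto then
      let index_espacio := PySem.Chars.find texto [' ']
      let palabra := PySem.Chars.slice texto none (some index_espacio)
      let limpia := palabra.foldl (fun acc letra => if letra ∈ pvPunct then acc else acc ++ [letra]) []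
      pvLoopA (PySem.Chars.slice texto (some (index_espacio + 1)) none) (palabras ++ [String.ofList limpia])
    else
      let limpia := texto.foldl (fun acc letra => if letra ∈ pvPunct then acc else acc ++ [letra]) []
      pvLoopA [] (palabras ++ [String.ofList limpia])
  else palabras
termination_by texto.length
decreasing_by
  · have h0 : 0 ≤ PySem.Chars.find texto [' '] :=
      (PySem.Chars.find_nonneg_iff texto [' ']).mpr ((PySem.Chars.isIn_iff_infix [' '] texto).mp h2)
    simp only [PySem.Chars.slice_eq_listSlice, PySem.List.slice_from texto (by omega : (0:Int) ≤ PySem.Chars.find texto [' '] + 1), List.length_drop]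
    omega
  · simpa using h1

def lista_de_palabras (texto : String) : List String := pvLoopA texto.toList []

-- ===== PORT B =====
def lista_de_palabras_alt (texto : String) : List String :=
  let tokens := PySem.Chars.splitOn texto.toList [' ']
  let tokens := if PySem.List.pyGet? tokens (-1) = some [] then tokens.dropLast else tokens
  tokens.map (fun w => String.ofList (w.filter (fun c => !decide (c ∈ pvPunct))))

-- ===== PRECONDITION & SPEC =====
def Spec_lista_de_palabras (texto : String) (out : List String) : Prop := out = lista_de_palabras_alt texto
instance (texto : String) (out : List String) : Decidable (Spec_lista_de_palabras texto out) := by unfold Spec_lista_de_palabras; infer_instance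

-- ===== CLAIM (what is proved, stated in full; the proofs are below) =====
def Claim_equal_lista_de_palabras : Prop := ∀ (texto : String), Dom_lista_de_palabras texto → Spec_lista_de_palabras texto (lista_de_palabras texto)

-- ===== LEMMAS AND PROOFS =====

-- structural form of str.split(' ') on the char list
def pvSplit : List Char → List (List Char)
  | [] => [[]]
  | c :: rest => if c = ' ' then [] :: pvSplit rest else (pvSplit rest).modifyHead (c :: ·)

theorem pvSplit_ne_nil (l : List Char) : pvSplit l ≠ [] := by
  cases l with
  | nil => simp [pvSplit]
  | cons c rest =>
    simp only [pvSplit]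
    split
    · simp
    · intro h
      exact pvSplit_ne_nil rest (by simpa using congrArg List.length h)

theorem pvGo_spec (fuel : Nat) (l cur : List Char) (acc : List (List Char)) (h : l.length < fuel) :
    PySem.Chars.splitOn.go [' '] fuel l cur acc =
      acc.reverse ++ (pvSplit l).modifyHead (cur.reverse ++ ·) := by
  induction fuel generalizing l cur acc with
  | zero => omega
  | succ f ih =>
    cases l with
    | nil =>
      rw [PySem.Chars.splitOn.go]
      · simp [pvSplit]
      · omega
    | cons c rest =>
      rw [PySem.Chars.splitOn.go]
      by_cases hc : c = ' '
      · have hp : [' '].isPrefixOf (c :: rest) = true := by simp [hc, List.isPrefixOf]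
        rw [if_pos hp, ih _ _ _ (by simpa using h)]
        subst hc
        simp [pvSplit, List.modifyHead]
        cases pvSplit rest <;> simp
      · have hp : [' '].isPrefixOf (c :: rest) = false := by
          simp [List.isPrefixOf]
          exact fun hcc => absurd hcc.symm hc
        rw [if_neg (by simp [hp]), ih _ _ _ (by simpa using h)]
        simp only [pvSplit, if_neg hc]
        congr 1
        obtain ⟨t, ts, hts⟩ : ∃ t ts, pvSplit rest = t :: ts := by
          cases hh : pvSplit rest with
          | nil => exact absurd hh (pvSplit_ne_nil rest)
          | cons t ts => exact ⟨t, ts, rfl⟩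
        simp [hts, List.modifyHead]

theorem pvSplitOn_eq (l : List Char) : PySem.Chars.splitOn l [' '] = pvSplit l := by
  have := pvGo_spec (l.length + 1) l [] [] (by omega)
  simpa [PySem.Chars.splitOn, show (fun x : List Char => x) = id from rfl,
    List.modifyHead_id] using this

theorem pvSplit_of_not_mem (l : List Char) (h : ' ' ∉ l) : pvSplit l = [l] := by
  induction l with
  | nil => rfl
  | cons c rest ih =>
    simp only [List.mem_cons, not_or] at h
    have hcs : ¬ c = ' ' := fun hc => h.1 hc.symm
    simp [pvSplit, hcs, ih h.2, List.modifyHead]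

theorem pvSplit_append (a b : List Char) (h : ' ' ∉ a) :
    pvSplit (a ++ ' ' :: b) = a :: pvSplit b := by
  induction a with
  | nil => simp [pvSplit]
  | cons c rest ih =>
    simp only [List.mem_cons, not_or] at h
    have hcs : ¬ c = ' ' := fun hc => h.1 hc.symm
    simp [pvSplit, hcs, ih h.2, List.modifyHead]

theorem pvClean_eq_filter (l acc : List Char) :
    l.foldl (fun acc letra => if letra ∈ pvPunct then acc else acc ++ [letra]) acc
      = acc ++ l.filter (fun c => !decide (c ∈ pvPunct)) := by
  induction l generalizing acc with
  | nil => simp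
  | cons c rest ih =>
    by_cases hc : c ∈ pvPunct <;> simp [List.foldl_cons, hc, ih]

-- the tokens B keeps, in structural form
def pvTokens (l : List Char) : List (List Char) :=
  if (pvSplit l).getLast? = some [] then (pvSplit l).dropLast else pvSplit l

theorem pvGetLast?_cons {α : Type} (a : α) (s : List α) (h : s ≠ []) :
    (a :: s).getLast? = s.getLast? := by
  cases s with
  | nil => simp at h
  | cons b t => simp [List.getLast?_cons_cons]

theorem pvTokens_split (a b : List Char) (h : ' ' ∉ a) :
    pvTokens (a ++ ' ' :: b) = a :: pvTokens b := by
  have hs := pvSplit_append a b h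
  have hne := pvSplit_ne_nil b
  unfold pvTokens
  rw [hs, pvGetLast?_cons a _ hne]
  split
  · rw [List.dropLast_cons_of_ne_nil hne]
  · rfl

theorem pvLoopA_spec (n : Nat) (l : List Char) (p : List String) (hn : l.length ≤ n) :
    pvLoopA l p = p ++ (pvTokens l).map (fun w => String.ofList (w.filter (fun c => !decide (c ∈ pvPunct)))) := by
  induction n generalizing l p with
  | zero =>
    have : l = [] := List.length_eq_zero_iff.mp (by omega)
    subst this
    rw [pvLoopA]
    simp [pvTokens, pvSplit]
  | succ n ih =>
    rcases Decidable.em (l = []) with rfl | hlne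
    · rw [pvLoopA]; simp [pvTokens, pvSplit]
    have h1 : 0 < l.length := List.length_pos_iff.mpr hlne
    by_cases h2 : PySem.Chars.isIn [' '] l
    · -- a space exists: l = take i ++ ' ' :: drop (i+1)
      have hinf : [' '] <:+: l := (PySem.Chars.isIn_iff_infix [' '] l).mp h2
      have h0 : 0 ≤ PySem.Chars.find l [' '] := (PySem.Chars.find_nonneg_iff l [' ']).mpr hinf
      obtain ⟨hpre, hmin⟩ := PySem.Chars.find_spec h0
      set i : Nat := (PySem.Chars.find l [' ']).toNat with hi
      obtain ⟨tl, htl⟩ : ∃ tl, l.drop i = ' ' :: tl := by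
        obtain ⟨t, ht⟩ := hpre
        exact ⟨t, by simpa using ht.symm⟩
      have hdrop1 : l.drop (i + 1) = tl := by
        rw [← List.drop_drop, htl]; rfl
      have hl : l = l.take i ++ ' ' :: tl := by
        conv_lhs => rw [← List.take_append_drop i l]
        rw [htl]
      have hnm : ' ' ∉ l.take i := by
        intro hmem
        obtain ⟨j, hj, hget⟩ := List.getElem_of_mem hmem
        have hjlt : j < i := lt_of_lt_of_le hj (by simpa using List.length_take_le i l)
        have hjl : j < l.length := by
          have hil : i ≤ l.length := by
            by_contra hcon
            push_neg at hcon
            rw [List.drop_eq_nil_of_le (le_of_lt hcon)] at htl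
            simp at htl
          omega
        have : [' '] <+: l.drop j := by
          rw [List.drop_eq_getElem_cons hjl]
          have : l[j] = ' ' := by
            rw [← List.getElem_take (h := hj)] at *
            simpa using hget
          simp [this]
        exact hmin j hjlt this
      -- evaluate one loop step
      rw [pvLoopA, dif_pos h1, dif_pos h2]
      have hslice1 : PySem.Chars.slice l none (some (PySem.Chars.find l [' '])) = l.take i := by
        simp [PySem.Chars.slice_eq_listSlice, PySem.List.slice_to l h0, hi]
      have hslice2 : PySem.Chars.slice l (some (PySem.Chars.find l [' '] + 1)) none = tl := by
        rw [PySem.Chars.slice_eq_listSlice, PySem.List.slice_from l (by omega), ← hdrop1]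
        congr 1
        omega
      simp only [hslice1, hslice2]
      have htln : tl.length ≤ n := by
        have := congrArg List.length hl
        simp at this
        omega
      rw [ih tl _ htln]
      conv_rhs => rw [hl, pvTokens_split _ _ hnm]
      simp [pvClean_eq_filter]
    · -- no space: one word, then the loop ends
      have hnm : ' ' ∉ l := by
        intro hmem
        exact h2 ((PySem.Chars.isIn_iff_infix [' '] l).mpr ((List.singleton_infix_iff ' ' l).mpr hmem))
      rw [pvLoopA, dif_pos h1, dif_neg h2, pvLoopA]
      simp only [List.length_nil, lt_self_iff_false, dite_false]
      unfold pvTokens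
      rw [pvSplit_of_not_mem l hnm]
      simp [hlne, pvClean_eq_filter]

theorem pvPyGet_neg_one {α : Type} (l : List α) (h : l ≠ []) :
    PySem.List.pyGet? l (-1) = l.getLast? := by
  have hl : 0 < l.length := List.length_pos_iff.mpr h
  simp only [PySem.List.pyGet?, PySem.List.pyIdx?]
  rw [if_neg (by omega), if_pos (by simp; omega)]
  simp [List.getLast?_eq_getElem?]

-- ===== VERDICT (by name: the statement is the Claim_ definition above) =====
theorem lista_de_palabras_spec : Claim_equal_lista_de_palabras := by
  intro texto _
  unfold Spec_lista_de_palabras lista_de_palabras lista_de_palabras_alt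
  rw [pvLoopA_spec texto.toList.length texto.toList [] le_rfl]
  simp only [List.nil_append, pvSplitOn_eq, pvTokens,
    pvPyGet_neg_one _ (pvSplit_ne_nil texto.toList)]
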